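-- pv_equiv track=rewrite | github.com/gagan3012/data | text_dataset/text_dataset.py | organize_files
-- ===== SOURCE A (Python) =====
-- from collections import defaultdict
--
-- def organize_files(file_paths):
--     organized_files = defaultdict(lambda: defaultdict(list))
--     for path in file_paths:
--         parts = path.split("/")
--         task_name = parts[-2]  # Change this index based on your path structure
--         split_type = parts[-1].split(".")[0]
--         organized_files[task_name][split_type].append(path)
--     return {k: dict(v) for k, v in organized_files.items()}
-- ===== SOURCE B (Python) =====
-- def organize_files(file_paths):
--     def task_of(p):
--         return p.split("/")[-2]
--
--     def split_of(p):
--         return p.split("/")[-1].split(".")[0]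
--
--     def uniq(xs):
--         return list(dict.fromkeys(xs))
--
--     def group(t):
--         by_task = [p for p in file_paths if task_of(p) == t]
--         return {s: [p for p in by_task if split_of(p) == s]
--                 for s in uniq(split_of(p) for p in by_task)}
--
--     return {t: group(t) for t in uniq(task_of(p) for p in file_paths)}
-- ===== Notes on version B (the rewrite author's own statement) =====
-- stated objective: alternative
-- what changed: Replaces the incremental defaultdict-of-defaultdict build with a declarative grouping: dedup the task keys (and, per task, the split keys) in first-appearance order and build each group by filtering the path list, so no mutable nested dict is threaded through the loop.
import Mathlib
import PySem

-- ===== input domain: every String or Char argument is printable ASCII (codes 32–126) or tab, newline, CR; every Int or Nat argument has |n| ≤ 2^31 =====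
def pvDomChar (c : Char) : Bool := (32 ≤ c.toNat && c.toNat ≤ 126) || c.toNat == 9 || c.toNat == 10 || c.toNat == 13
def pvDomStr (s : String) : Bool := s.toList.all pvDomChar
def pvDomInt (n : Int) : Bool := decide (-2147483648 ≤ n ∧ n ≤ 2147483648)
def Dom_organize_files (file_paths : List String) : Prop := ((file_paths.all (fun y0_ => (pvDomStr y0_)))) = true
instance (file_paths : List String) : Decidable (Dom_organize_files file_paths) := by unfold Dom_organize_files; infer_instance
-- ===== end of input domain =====

-- B replaces A's incremental defaultdict-of-defaultdict build by deduplicating the task/split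
-- keys in first-appearance order and filtering the path list per key (alternative decomposition,
-- same cost class on typical inputs).


-- ===== PORT A =====
-- parts[-2] / parts[-1] / [0] are PySem.List.pyGet?; the .getD "" default is only reached where
-- Python raises IndexError (no "/" in the path), which Pre_organize_files excludes.
def organize_files (file_paths : List String) : List (String × List (String × List String)) :=
  let organized :=
    file_paths.foldl (fun d path =>
      let parts := (PySem.Str.split? path "/").getD []
      let task_name := (PySem.List.pyGet? parts (-2)).getD ""
      let split_type := (PySem.List.pyGet? ((PySem.Str.split? ((PySem.List.pyGet? parts (-1)).getD "") ".").getD []) 0).getD ""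
      d.modify task_name PySem.Dict.empty (fun inner => inner.modify split_type [] (fun l => l ++ [path])))
      PySem.Dict.empty
  organized.items.map (fun kv => (kv.1, kv.2.items))

-- ===== PORT B =====
def pvTaskOf (p : String) : String :=
  (PySem.List.pyGet? ((PySem.Str.split? p "/").getD []) (-2)).getD ""

def pvSplitOf (p : String) : String :=
  (PySem.List.pyGet? ((PySem.Str.split? ((PySem.List.pyGet? ((PySem.Str.split? p "/").getD []) (-1)).getD "") ".").getD []) 0).getD ""

def pvGroup (file_paths : List String) (t : String) : List (String × List String) :=
  let by_task := file_paths.filter (fun p => pvTaskOf p == t)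
  (PySem.List.dedup (by_task.map pvSplitOf)).map (fun s =>
    (s, by_task.filter (fun p => pvSplitOf p == s)))

def organize_files_alt (file_paths : List String) : List (String × List (String × List String)) :=
  (PySem.List.dedup (file_paths.map pvTaskOf)).map (fun t => (t, pvGroup file_paths t))

-- ===== PRECONDITION & SPEC =====
-- Pre_ excludes exactly the paths with no "/", on which Python A raises IndexError at parts[-2].
def Pre_organize_files (file_paths : List String) : Prop :=
  (file_paths.all (fun p => PySem.Str.isIn "/" p)) = true
instance (file_paths : List String) : Decidable (Pre_organize_files file_paths) := by
  unfold Pre_organize_files; infer_instance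
def pvWitness_organize_files : List String := (["x/a/train.csv", "x/a/test.csv", "y/b/train.csv"])

def Spec_organize_files (file_paths : List String) (out : List (String × List (String × List String))) : Prop := out = organize_files_alt file_paths
instance (file_paths : List String) (out : List (String × List (String × List String))) : Decidable (Spec_organize_files file_paths out) := by unfold Spec_organize_files; infer_instance

-- ===== CLAIM (what is proved, stated in full; the proofs are below) =====
def Claim_equal_organize_files : Prop := ∀ (file_paths : List String), Dom_organize_files file_paths → Pre_organize_files file_paths → Spec_organize_files file_paths (organize_files file_paths)

-- ===== LEMMAS AND PROOFS =====

-- the loop body of port A, named for the proofs (definitionally equal to the fold body)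
def pvStepA (d : PySem.Dict String (PySem.Dict String (List String))) (path : String) :
    PySem.Dict String (PySem.Dict String (List String)) :=
  d.modify (pvTaskOf path) PySem.Dict.empty (fun inner => inner.modify (pvSplitOf path) [] (fun l => l ++ [path]))

theorem organize_files_eq_foldl (file_paths : List String) :
    organize_files file_paths =
      (file_paths.foldl pvStepA PySem.Dict.empty).items.map (fun kv => (kv.1, kv.2.items)) := rfl

-- getD of a "modify at key of x" fold: the fold restricted to the matching elements
theorem getD_foldl_modify_key {ν : Type} (l : List String) (key : String → String)
    (d0 : ν) (g : String → ν → ν) (d : PySem.Dict String ν) (t : String) :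
    (l.foldl (fun d x => d.modify (key x) d0 (g x)) d).getD t d0 =
      (l.filter (fun x => key x == t)).foldl (fun v x => g x v) (d.getD t d0) := by
  induction l generalizing d with
  | nil => rfl
  | cons x l ih =>
    simp only [List.foldl_cons, List.filter_cons, ih, PySem.Dict.getD_modify]
    by_cases h : key x = t
    · simp [h]
    · simp [h, Ne.symm h, beq_iff_eq]

theorem foldl_snoc_eq {α : Type} (l : List α) (a : List α) :
    l.foldl (fun acc x => acc ++ [x]) a = a ++ l := by
  induction l generalizing a with
  | nil => simp
  | cons x l ih => simp [ih]

theorem foldl_stepA_getD (l : List String) (d : PySem.Dict String (PySem.Dict String (List String))) (t : String) :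
    (l.foldl pvStepA d).getD t PySem.Dict.empty =
      (l.filter (fun x => pvTaskOf x == t)).foldl
        (fun inner x => inner.modify (pvSplitOf x) [] (fun l => l ++ [x]))
        (d.getD t PySem.Dict.empty) :=
  getD_foldl_modify_key l pvTaskOf PySem.Dict.empty
    (fun x inner => inner.modify (pvSplitOf x) [] (fun l => l ++ [x])) d t

-- inner fold, started from the empty dict, as an explicit dedup-and-filter table
theorem inner_fold_items (l : List String) :
    ((l.foldl (fun inner x => inner.modify (pvSplitOf x) [] (fun ls => ls ++ [x]))
        PySem.Dict.empty).items) =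
      (PySem.List.dedup (l.map pvSplitOf)).map (fun s => (s, l.filter (fun p => pvSplitOf p == s))) := by
  have hnd : (l.foldl (fun inner x => inner.modify (pvSplitOf x) [] (fun ls => ls ++ [x]))
      PySem.Dict.empty).keys.Nodup := by
    exact PySem.Dict.nodup_keys_foldl_modify_key l pvSplitOf [] (fun d x ls => ls ++ [x]) _
      PySem.Dict.nodup_keys_empty
  rw [PySem.Dict.items_eq_map_keys _ hnd []]
  rw [PySem.Dict.keys_foldl_modify_key]
  have hkeys : PySem.Set.update (PySem.Dict.empty (κ := String) (ν := List String)).keys (l.map pvSplitOf)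
      = PySem.List.dedup (l.map pvSplitOf) := by
    simp [PySem.Dict.keys_empty, PySem.Set.update_nil_left]
  rw [hkeys]
  refine List.map_congr_left (fun s hs => ?_)
  rw [getD_foldl_modify_key l pvSplitOf [] (fun x ls => ls ++ [x]) PySem.Dict.empty s,
    PySem.Dict.getD_empty, foldl_snoc_eq]
  simp

-- ===== VERDICT (by name: the statement is the Claim_ definition above) =====
theorem organize_files_spec : Claim_equal_organize_files := by
  intro file_paths _ _
  unfold Spec_organize_files
  rw [organize_files_eq_foldl]
  have hnd : (file_paths.foldl pvStepA PySem.Dict.empty).keys.Nodup := by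
    exact PySem.Dict.nodup_keys_foldl_modify_key file_paths pvTaskOf PySem.Dict.empty
      (fun d x inner => inner.modify (pvSplitOf x) [] (fun l => l ++ [x])) _
      PySem.Dict.nodup_keys_empty
  rw [PySem.Dict.items_eq_map_keys _ hnd PySem.Dict.empty]
  have hkeys : (file_paths.foldl pvStepA PySem.Dict.empty).keys
      = PySem.List.dedup (file_paths.map pvTaskOf) := by
    rw [show pvStepA = (fun d x => d.modify (pvTaskOf x) PySem.Dict.empty
        ((fun x inner => inner.modify (pvSplitOf x) [] (fun l => l ++ [x])) x)) from rfl]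
    rw [PySem.Dict.keys_foldl_modify_key]
    simp [PySem.Dict.keys_empty, PySem.Set.update_nil_left]
  rw [hkeys]
  unfold organize_files_alt
  simp only [List.map_map]
  refine List.map_congr_left (fun t ht => ?_)
  simp only [Function.comp]
  rw [foldl_stepA_getD]
  unfold pvGroup
  simp only [PySem.Dict.getD_empty]
  rw [inner_fold_items]
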